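-- pv_equiv track=rewrite | github.com/Mc01/codewars-tasks | anagram/anagram_akcelero.py | listPosition
-- ===== SOURCE A (Python) =====
-- class SumTree:
--     def __init__(self, word):
--         letters = sorted(set(word))
--         self.first_leaf = 1
--         while self.first_leaf <= len(letters):
--             self.first_leaf *= 2
--         self.arr = [0 for _ in range(self.first_leaf * 2)]
--         self.letters = {l: self.first_leaf + i + 1 for i, l in enumerate(letters)}
--
--     def increment_and_get(self, letter):
--         result = 0
--         node = self.letters[letter]
--         letter_num = self.arr[node] + 1
--         self.arr[node] = letter_num
--         while node ^ 1:
--             if node & 1: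
--                 result += self.arr[node - 1]
--             node >>= 1
--             self.arr[node] += 1
--         return letter_num, result
--
-- def listPosition(word):
--     sum_tree = SumTree(word)
--     result = 0
--     dividend = 1  # will factorial of next numbers
--     divider = 1 # will be constructed in each
--     for i, first_letter in enumerate(word[::-1], start=1):
--         letter_num, possible_on_first_place = sum_tree.increment_and_get(first_letter)
--         divider *= letter_num
--         result += possible_on_first_place * dividend // divider
--         dividend *= i
--     return result + 1 # result should be counted from 1
-- ===== SOURCE B (Python) =====
-- def listPosition(word):
--     counts = {}
--     for ch in word:
--         counts[ch] = counts.get(ch, 0) + 1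
--     n = len(word)
--     facts = [1]
--     f = 1
--     for i in range(1, n + 1):
--         f *= i
--         facts.append(f)
--     rank = 1
--     for i, ch in enumerate(word):
--         smaller = sum(v for k, v in counts.items() if k < ch)
--         if smaller:
--             denom = 1
--             for v in counts.values():
--                 denom *= facts[v]
--             rank += smaller * facts[n - i - 1] // denom
--         counts[ch] -= 1
--     return rank
-- ===== Notes on version B (the rewrite author's own statement) =====
-- stated objective: alternative
-- what changed: Replaces the Fenwick sum tree over sorted distinct letters and the right-to-left running dividend/divider factorial products with a left-to-right scan over a plain letter-frequency dict plus a precomputed factorial table, computing each position's contribution directly as smaller * fact(remaining) // product of factorials of the remaining letter counts.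
import Mathlib
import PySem

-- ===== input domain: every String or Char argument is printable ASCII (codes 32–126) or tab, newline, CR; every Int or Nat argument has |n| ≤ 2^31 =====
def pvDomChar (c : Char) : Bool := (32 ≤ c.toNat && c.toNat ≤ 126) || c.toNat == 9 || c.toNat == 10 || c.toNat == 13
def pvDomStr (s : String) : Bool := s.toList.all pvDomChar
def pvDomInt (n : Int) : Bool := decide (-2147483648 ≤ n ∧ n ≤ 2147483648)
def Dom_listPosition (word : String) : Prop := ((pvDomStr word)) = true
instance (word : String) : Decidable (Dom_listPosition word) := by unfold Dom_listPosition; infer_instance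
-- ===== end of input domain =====

-- B replaces A's Fenwick sum tree and right-to-left factorial accumulation by a left-to-right
-- scan over a letter-frequency dict with a precomputed factorial table (same cost, plainer data).



-- ===== PORT A =====
-- A builds a binary-indexed sum tree over the sorted distinct letters and walks the
-- word right-to-left, accumulating possible_on_first_place * dividend // divider.

-- `while self.first_leaf <= len(letters): self.first_leaf *= 2` — the `0 < f` conjunct is
-- only a totality guard (the call site passes f = 1, and f stays positive).
def pvFirstLeaf (m f : Nat) : Nat :=
  if 0 < f ∧ f ≤ m then pvFirstLeaf m (2 * f) else f
termination_by m + 1 - f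
decreasing_by omega

-- the `while node ^ 1:` loop of increment_and_get; `node ≤ 1` is the exit condition
-- `node == 1` plus a totality guard for node = 0 (unreachable: node starts ≥ 2).
-- arr indices are always in range, so getD/set are exact.
def pvIgLoop (arr : List Int) (node : Nat) (result : Int) : Int × List Int :=
  if node ≤ 1 then (result, arr)
  else
    let result := if node % 2 = 1 then result + arr.getD (node - 1) 0 else result
    let node' := node / 2
    let arr' := arr.set node' (arr.getD node' 0 + 1)
    pvIgLoop arr' node' result
termination_by node
decreasing_by omega

-- SumTree.increment_and_get (state-passing: takes and returns the array `self.arr`)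
def pvIncGet (arr : List Int) (node : Nat) : Int × Int × List Int :=
  let letterNum := arr.getD node 0 + 1
  let arr1 := arr.set node letterNum
  let r := pvIgLoop arr1 node 0
  (letterNum, r.1, r.2)

-- letters = sorted(set(word))
def pvLetters (word : String) : List Char :=
  PySem.List.sorted (PySem.Set.ofList word.toList) (fun c => c) false

-- self.letters = {l: self.first_leaf + i + 1 for i, l in enumerate(letters)}
-- (node numbers are nonnegative array indices, kept as Nat; p.1 = i ≥ 0 so .toNat is exact)
def pvLetterDict (f : Nat) (letters : List Char) : PySem.Dict Char Nat :=
  (PySem.List.enumerate letters 0).foldl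
    (fun d p => d.insert p.2 (f + p.1.toNat + 1)) PySem.Dict.empty

def listPosition (word : String) : Int :=
  let letters := pvLetters word
  let f := pvFirstLeaf letters.length 1
  let dict := pvLetterDict f letters
  let arr0 : List Int := List.replicate (2 * f) 0      -- [0 for _ in range(first_leaf * 2)]
  -- word[::-1]: step -1 ≠ 0, so slice? is always `some` and the getD default is unreachable
  let rev := (PySem.List.slice? word.toList none none (-1)).getD []
  let st :=
    (PySem.List.enumerate rev 1).foldl
      (fun (st : List Int × Int × Int × Int) p =>
        let arr := st.1
        let result := st.2.1
        let dividend := st.2.2.1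
        let divider := st.2.2.2
        -- dict lookup: every letter of word is a key, so the KeyError default is unreachable
        let node := (dict.get? p.2).getD 0
        let r := pvIncGet arr node
        let divider := divider * r.1
        let result := result + PySem.Int.floordiv (r.2.1 * dividend) divider
        let dividend := dividend * p.1
        (r.2.2, result, dividend, divider))
      (arr0, 0, 1, 1)
  st.2.1 + 1

-- ===== PORT B =====
-- B precomputes the factorial table of the word length, keeps a letter-frequency dict and
-- walks the word left to right, adding for each position
-- smaller * facts[remaining] // (product of factorials of remaining counts).

def listPosition_alt (word : String) : Int :=
  let counts0 : PySem.Dict Char Int :=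
    word.toList.foldl (fun d ch => d.insert ch (d.getD ch 0 + 1)) PySem.Dict.empty
  let n : Int := PySem.Str.len word
  -- facts = [1]; f = 1; for i in range(1, n + 1): f *= i; facts.append(f)
  let ft := (PySem.List.pyRange 1 (n + 1) 1).foldl
    (fun (st : List Int × Int) i => (st.1 ++ [st.2 * i], st.2 * i)) ([1], 1)
  let facts := ft.1
  let st :=
    (PySem.List.enumerate word.toList 0).foldl
      (fun (st : PySem.Dict Char Int × Int) p =>
        let counts := st.1
        let rank := st.2
        let ch := p.2
        let smaller := counts.items.foldl
          (fun s kv => if kv.1 < ch then s + kv.2 else s) 0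
        let rank :=
          if smaller ≠ 0 then
            -- facts[v] and facts[n - i - 1]: the indices are always in range (0 ≤ v ≤ n,
            -- 0 ≤ n - i - 1 < n + 1), so getD-with-default indexing is exact here
            let denom := counts.values.foldl
              (fun pr v => pr * PySem.List.pyGetD facts v 0) 1
            rank + PySem.Int.floordiv
              (smaller * PySem.List.pyGetD facts (n - p.1 - 1) 0) denom
          else rank
        -- counts[ch] -= 1 (ch is always a key, so the KeyError default is unreachable)
        let counts := counts.insert ch (counts.getD ch 0 - 1)
        (counts, rank))
      (counts0, 1)
  st.2

-- ===== PRECONDITION & SPEC =====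
def Spec_listPosition (word : String) (out : Int) : Prop := out = listPosition_alt word
instance (word : String) (out : Int) : Decidable (Spec_listPosition word out) := by unfold Spec_listPosition; infer_instance

-- ===== CLAIM (what is proved, stated in full; the proofs are below) =====
def Claim_equal_listPosition : Prop := ∀ (word : String), Dom_listPosition word → Spec_listPosition word (listPosition word)


-- ===== LEMMAS AND PROOFS =====
def pvAddPath (arr : List Int) (v : Nat) : List Int :=
  if v ≤ 1 then arr
  else pvAddPath (arr.set (v / 2) (arr.getD (v / 2) 0 + 1)) (v / 2)
termination_by v
decreasing_by omega
def pvLeftSum (arr : List Int) (v : Nat) : Int :=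
  if v ≤ 1 then 0
  else (if v % 2 = 1 then arr.getD (v - 1) 0 else 0) + pvLeftSum arr (v / 2)
termination_by v
decreasing_by omega
def pvIns (arr : List Int) (w : Nat) : List Int :=
  pvAddPath (arr.set w (arr.getD w 0 + 1)) w

theorem pvGetD_set_ne (l : List Int) (i j : Nat) (x d : Int) (h : i ≠ j) :
    (l.set i x).getD j d = l.getD j d := by
  simp [List.getD, List.getElem?_set_ne h]

theorem pvGetD_set_self (l : List Int) (i : Nat) (x d : Int) (h : i < l.length) :
    (l.set i x).getD i d = x := by
  simp [List.getD, h]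

theorem pvLeftSum_set_ge (u : Nat) : ∀ (p : Nat) (x : Int) (arr : List Int), u ≤ p →
    pvLeftSum (arr.set p x) u = pvLeftSum arr u := by
  induction u using Nat.strong_induction_on with
  | _ u ih =>
    intro p x arr hup
    conv_lhs => rw [pvLeftSum]
    conv_rhs => rw [pvLeftSum]
    by_cases h : u ≤ 1
    · simp [h]
    · simp only [h, if_false]
      rw [pvGetD_set_ne _ _ _ _ _ (by omega), ih (u/2) (by omega) p x arr (by omega)]

theorem pvIgLoop_eq (node : Nat) : ∀ (arr : List Int) (res : Int),
    pvIgLoop arr node res = (res + pvLeftSum arr node, pvAddPath arr node) := by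
  induction node using Nat.strong_induction_on with
  | _ node ih =>
    intro arr res
    rw [pvIgLoop]
    conv_rhs => rw [pvLeftSum, pvAddPath]
    by_cases h : node ≤ 1
    · simp [h]
    · simp only [h, if_false]
      rw [ih (node/2) (by omega)]
      rw [pvLeftSum_set_ge (node/2) (node/2) _ arr (le_refl _)]
      split_ifs with hodd <;> ring_nf

theorem pvAddPath_getD_of_lt (v : Nat) : ∀ (arr : List Int) (p : Nat) (d : Int), v < 2 * p →
    (pvAddPath arr v).getD p d = arr.getD p d := by
  induction v using Nat.strong_induction_on with
  | _ v ih =>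
    intro arr p d hv
    rw [pvAddPath]
    by_cases h : v ≤ 1
    · simp [h]
    · simp only [h, if_false]
      rw [ih (v/2) (by omega) _ p d (by omega), pvGetD_set_ne _ _ _ _ _ (by omega)]

theorem pvAddPath_length (v : Nat) : ∀ (arr : List Int),
    (pvAddPath arr v).length = arr.length := by
  induction v using Nat.strong_induction_on with
  | _ v ih =>
    intro arr
    rw [pvAddPath]
    by_cases h : v ≤ 1
    · simp [h]
    · simp only [h, if_false]
      rw [ih (v/2) (by omega)]; simp

theorem pvIns_length (arr : List Int) (w : Nat) : (pvIns arr w).length = arr.length := by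
  rw [pvIns, pvAddPath_length]; simp

theorem pvIns_getD (arr : List Int) (w u : Nat) (hw : w < arr.length) (hu : w < 2 * u) :
    (pvIns arr w).getD u 0 = if u = w then arr.getD u 0 + 1 else arr.getD u 0 := by
  rw [pvIns, pvAddPath_getD_of_lt _ _ _ _ hu]
  split_ifs with he
  · subst he; rw [pvGetD_set_self _ _ _ _ hw]
  · rw [pvGetD_set_ne _ _ _ _ _ (by omega)]

theorem pvIns_step (arr : List Int) (w : Nat) (h : 2 ≤ w) :
    pvIns arr w = pvIns (arr.set w (arr.getD w 0 + 1)) (w / 2) := by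
  conv_lhs => rw [pvIns, pvAddPath]
  rw [if_neg (by omega), pvIns]

theorem pvFenwick : ∀ (L : Nat) (arr : List Int) (u w : Nat),
    2 ^ L ≤ u → u < 2 ^ (L + 1) → 2 ^ L ≤ w → w < 2 ^ (L + 1) → 2 ^ (L + 1) ≤ arr.length →
    pvLeftSum (pvIns arr w) u = pvLeftSum arr u + (if w < u then 1 else 0) := by
  intro L
  induction L with
  | zero =>
    intro arr u w h1 h2 h3 h4 h5
    simp only [pow_zero, pow_one] at *
    have hu : u = 1 := by omega
    have hw : w = 1 := by omega
    subst hu; subst hw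
    rw [pvIns]
    conv_lhs => rw [pvLeftSum]
    conv_rhs => rw [pvLeftSum]
    simp [pvAddPath]
  | succ L ih =>
    intro arr u w h1 h2 h3 h4 h5
    have h2L : 1 ≤ 2 ^ L := Nat.one_le_two_pow
    have hp : 2 ^ (L + 1) = 2 * 2 ^ L := by ring
    have hp2 : 2 ^ (L + 2) = 2 * 2 ^ (L + 1) := by ring
    rw [hp2] at h2 h4
    rw [hp] at h1 h3
    have hw2 : 2 ≤ w := by omega
    rw [pvIns_step arr w hw2]
    conv_lhs => rw [pvLeftSum]
    rw [if_neg (by omega : ¬ u ≤ 1)]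
    conv_rhs => rw [pvLeftSum]
    rw [if_neg (by omega : ¬ u ≤ 1)]
    have hlen1 : (arr.set w (arr.getD w 0 + 1)).length = arr.length := by simp
    rw [ih _ (u/2) (w/2) (by omega) (by omega) (by omega) (by omega) (by omega)]
    rw [pvLeftSum_set_ge (u/2) w _ arr (by omega)]
    by_cases ho : u % 2 = 1
    · rw [if_pos ho, if_pos ho]
      rw [pvIns_getD _ (w/2) (u-1) (by omega) (by omega), if_neg (by omega)]
      by_cases hwe : w = u - 1
      · rw [← hwe, pvGetD_set_self _ _ _ _ (by omega)]
        rw [if_neg (by omega : ¬ w/2 < u/2), if_pos (by omega : w < u)]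
        ring
      · rw [pvGetD_set_ne _ _ _ _ _ (by omega)]
        split_ifs <;> (first | (exfalso; omega) | ring)
    · rw [if_neg ho, if_neg ho]
      split_ifs <;> (first | (exfalso; omega) | ring)

def pvInsL (n : Nat) : List Nat → List Int
  | [] => List.replicate n 0
  | w :: ws => pvIns (pvInsL n ws) w

theorem pvInsL_length (n : Nat) (ls : List Nat) : (pvInsL n ls).length = n := by
  induction ls with
  | nil => simp [pvInsL]
  | cons w ws ih => rw [pvInsL, pvIns_length, ih]

theorem pvLeftSum_replicate (u n : Nat) : pvLeftSum (List.replicate n (0 : Int)) u = 0 := by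
  induction u using Nat.strong_induction_on with
  | _ u ih =>
    rw [pvLeftSum]
    by_cases h : u ≤ 1
    · simp [h]
    · simp only [h, if_false]
      rw [ih (u/2) (by omega)]
      split_ifs with ho
      · simp [List.getD, List.getElem?_replicate]
        split_ifs <;> rfl
      · rfl

theorem pvLeftSum_insL (L : Nat) (ls : List Nat) (u : Nat)
    (hls : ∀ w ∈ ls, 2 ^ L ≤ w ∧ w < 2 ^ (L + 1))
    (hu1 : 2 ^ L ≤ u) (hu2 : u < 2 ^ (L + 1)) :
    pvLeftSum (pvInsL (2 ^ (L + 1)) ls) u = ((ls.countP (· < u)) : Int) := by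
  induction ls with
  | nil => simp [pvInsL, pvLeftSum_replicate]
  | cons w ws ih =>
    have hw := hls w (by simp)
    rw [pvInsL, pvFenwick L _ u w hu1 hu2 hw.1 hw.2 (by rw [pvInsL_length]),
      ih (fun x hx => hls x (by simp [hx]))]
    rw [List.countP_cons]
    split_ifs with h1 h2 h2 <;> simp_all <;> omega

theorem pvGetD_replicate (n i : Nat) (d : Int) :
    (List.replicate n (0:Int)).getD i d = if i < n then 0 else d := by
  simp [List.getD, List.getElem?_replicate]
  split_ifs <;> rfl

theorem pvInsL_getD (L : Nat) (ls : List Nat) (u : Nat)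
    (hls : ∀ w ∈ ls, 2 ^ L ≤ w ∧ w < 2 ^ (L + 1))
    (hu1 : 2 ^ L ≤ u) (hu2 : u < 2 ^ (L + 1)) :
    (pvInsL (2 ^ (L + 1)) ls).getD u 0 = ((ls.count u) : Int) := by
  induction ls with
  | nil => rw [pvInsL, pvGetD_replicate, if_pos (by omega)]; simp
  | cons w ws ih =>
    have hw := hls w (by simp)
    have hp : 2 ^ (L + 1) = 2 * 2 ^ L := by ring
    rw [pvInsL, pvIns_getD _ w u (by rw [pvInsL_length]; omega) (by omega),
      ih (fun x hx => hls x (by simp [hx]))]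
    rw [List.count_cons]
    push_cast
    by_cases h1 : u = w
    · subst h1; simp
    · simp [h1, Ne.symm h1]


theorem pvIncGet_spec (L : Nat) (ls : List Nat) (u : Nat)
    (hls : ∀ w ∈ ls, 2 ^ L ≤ w ∧ w < 2 ^ (L + 1))
    (hu1 : 2 ^ L ≤ u) (hu2 : u < 2 ^ (L + 1)) : pvIncGet (pvInsL (2 ^ (L + 1)) ls) u =
      (((ls.count u) : Int) + 1, ((ls.countP (· < u)) : Int), pvInsL (2 ^ (L + 1)) (u :: ls)) := by
  rw [pvIncGet]
  simp only [pvIgLoop_eq]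
  rw [pvLeftSum_set_ge u u _ _ (le_refl u), pvLeftSum_insL L ls u hls hu1 hu2,
    pvInsL_getD L ls u hls hu1 hu2]
  show (_, _, _) = _
  rw [pvInsL, pvIns, pvInsL_getD L ls u hls hu1 hu2]
  simp


theorem pvFirstLeaf_pow (m : Nat) : ∀ (n f k : Nat), n = m + 1 - f → f = 2 ^ k →
    ∃ K, pvFirstLeaf m f = 2 ^ K ∧ m < 2 ^ K := by
  intro n
  induction n using Nat.strong_induction_on with
  | _ n ih =>
    intro f k hn hf
    have hfpos : 0 < f := by rw [hf]; positivity
    rw [pvFirstLeaf]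
    by_cases h : 0 < f ∧ f ≤ m
    · rw [if_pos h]
      exact ih (m + 1 - 2 * f) (by omega) (2 * f) (k + 1) rfl (by rw [hf]; ring)
    · rw [if_neg h]
      exact ⟨k, hf, by omega⟩


def pvFactN (n : Nat) : Int := (n.factorial : Int)

def pvDenom : List Char → Int
  | [] => 1
  | c :: t => pvDenom t * ((t.count c : Int) + 1)

theorem pvFactsTable : ∀ (m : Nat),
    (PySem.List.pyRange 1 ((m : Int) + 1) 1).foldl
      (fun (st : List Int × Int) i => (st.1 ++ [st.2 * i], st.2 * i)) ([1], 1)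
    = ((List.range (m + 1)).map (fun j => pvFactN j), pvFactN m) := by
  intro m
  induction m with
  | zero =>
    rw [PySem.List.pyRange_one_eq_nil (by norm_num)]
    simp [pvFactN, Nat.factorial]
  | succ m ih =>
    have h2 : PySem.List.pyRange 1 (((m + 1 : Nat) : Int) + 1) 1
        = PySem.List.pyRange 1 ((m : Int) + 1) 1 ++ [(m : Int) + 1] := by
      push_cast
      exact PySem.List.pyRange_one_succ_right (by omega)
    rw [h2, List.foldl_append, ih]
    have hfs : pvFactN m * ((m : Int) + 1) = pvFactN (m + 1) := by
      rw [pvFactN, pvFactN, Nat.factorial_succ]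
      push_cast; ring
    rw [List.range_succ (n := m + 1), List.map_append]
    simp only [List.map_cons, List.map_nil, List.foldl_cons, List.foldl_nil]
    rw [hfs]

theorem pvDenom_pos (l : List Char) : 0 < pvDenom l := by
  induction l with
  | nil => norm_num [pvDenom]
  | cons c t ih => rw [pvDenom]; positivity

theorem pvMemCount (c : Char) : ∀ (ds : List Char), ds.Nodup → c ∈ ds →
    ((ds.map (fun d => if d = c then (1:Int) else 0)).sum) = 1 := by
  intro ds
  induction ds with
  | nil => simp
  | cons d ds ih =>
    intro hnd hmem
    simp only [List.map_cons, List.sum_cons]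
    by_cases h : d = c
    · subst h
      have : d ∉ ds := (List.nodup_cons.mp hnd).1
      have : (ds.map (fun e => if e = d then (1:Int) else 0)).sum = 0 := by
        apply List.sum_eq_zero; intro x hx
        simp only [List.mem_map] at hx
        obtain ⟨e, he, rfl⟩ := hx
        simp only [ite_eq_right_iff]
        intro he2; subst he2; exact absurd he this
      simp [this]
    · rw [if_neg h]
      have : c ∈ ds := by cases hmem with | head => exact absurd rfl h | tail _ hm => exact hm
      rw [ih (List.nodup_cons.mp hnd).2 this]; ring

theorem pvSum_count_lt (c : Char) : ∀ (l ds : List Char), ds.Nodup →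
    (∀ d ∈ l, d ∈ ds) →
    (ds.map (fun d => if d < c then ((l.count d) : Int) else 0)).sum
      = ((l.countP (· < c)) : Int) := by
  intro l
  induction l with
  | nil =>
    intro ds _ _
    simp only [List.count_nil, List.countP_nil, Nat.cast_zero]
    apply List.sum_eq_zero; intro x hx
    simp only [List.mem_map] at hx
    obtain ⟨e, _, rfl⟩ := hx
    split_ifs <;> rfl
  | cons x t ih =>
    intro ds hnd hcov
    have hx : x ∈ ds := hcov x (by simp)
    have step : ∀ d : Char, (if d < c then (((x :: t).count d) : Int) else 0)
        = (if d < c then ((t.count d) : Int) else 0)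
          + (if x < c then (if d = x then (1:Int) else 0) else 0) := by
      intro d
      rw [List.count_cons]
      by_cases h1 : d < c <;> by_cases h2 : d = x
      · subst h2; simp [h1]
      · simp [h1, h2, (show ¬ x = d from fun h => h2 h.symm)]
      · subst h2; simp [h1]
      · simp [h1, h2, (show ¬ x = d from fun h => h2 h.symm)]
    calc (ds.map (fun d => if d < c then (((x :: t).count d) : Int) else 0)).sum
        = (ds.map (fun d => (if d < c then ((t.count d) : Int) else 0)
            + (if x < c then (if d = x then (1:Int) else 0) else 0))).sum := by
          congr 1; exact List.map_congr_left (fun d _ => step d)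
      _ = (ds.map (fun d => if d < c then ((t.count d) : Int) else 0)).sum
            + (ds.map (fun d => if x < c then (if d = x then (1:Int) else 0) else 0)).sum := by
          rw [← List.sum_map_add]
      _ = ((t.countP (· < c)) : Int) + (if x < c then (1:Int) else 0) := by
          rw [ih ds hnd (fun d hd => hcov d (by simp [hd]))]
          congr 1
          by_cases hxc : x < c
          · simp only [hxc, if_true]; exact pvMemCount x ds hnd hx
          · simp only [hxc, if_false]
            apply List.sum_eq_zero; intro y hy
            simp only [List.mem_map] at hy
            obtain ⟨e, _, rfl⟩ := hy
            rfl
      _ = ((( x :: t).countP (· < c)) : Int) := by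
          rw [List.countP_cons]
          push_cast
          by_cases hxc : x < c <;> simp [hxc]

theorem pvProd_step (x : Char) (t : List Char) : ∀ (ds : List Char), ds.Nodup → x ∈ ds →
    (ds.map (fun d => pvFactN ((x :: t).count d))).prod
      = ((t.count x : Int) + 1) * (ds.map (fun d => pvFactN (t.count d))).prod := by
  intro ds
  induction ds with
  | nil => simp
  | cons d ds ih =>
    intro hnd hmem
    simp only [List.map_cons, List.prod_cons]
    by_cases h : d = x
    · subst h
      have hnotin : d ∉ ds := (List.nodup_cons.mp hnd).1
      have hmap : ds.map (fun e => pvFactN ((d :: t).count e))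
          = ds.map (fun e => pvFactN (t.count e)) := by
        apply List.map_congr_left
        intro e he
        have : e ≠ d := fun h => hnotin (h ▸ he)
        simp [List.count_cons, Ne.symm this]
      rw [hmap, List.count_cons_self, pvFactN, pvFactN, Nat.factorial_succ]
      push_cast; ring
    · have hx : x ∈ ds := by cases hmem with | head => exact absurd rfl h | tail _ hm => exact hm
      rw [ih (List.nodup_cons.mp hnd).2 hx]
      simp only [List.count_cons, beq_iff_eq, (show ¬ x = d from fun hh => h hh.symm), if_false]
      ring

theorem pvProd_fact : ∀ (l ds : List Char), ds.Nodup → (∀ d ∈ l, d ∈ ds) →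
    (ds.map (fun d => pvFactN (l.count d))).prod = pvDenom l := by
  intro l
  induction l with
  | nil =>
    intro ds _ _
    rw [pvDenom]
    apply List.prod_eq_one
    intro x hx
    simp only [List.mem_map] at hx
    obtain ⟨e, _, rfl⟩ := hx
    simp [pvFactN, Nat.factorial]
  | cons x t ih =>
    intro ds hnd hcov
    rw [pvProd_step x t ds hnd (hcov x (by simp)),
      ih ds hnd (fun d hd => hcov d (by simp [hd])), pvDenom]
    ring


theorem pvLetterDict_get (f : Nat) (letters : List Char) (hnd : letters.Nodup) (c : Char)
    (hc : c ∈ letters) :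
    (pvLetterDict f letters).get? c = some (f + letters.idxOf c + 1) := by
  have hitems : (pvLetterDict f letters).items
      = [] ++ (PySem.List.enumerate letters 0).map (fun a => (a.2, f + a.1.toNat + 1)) := by
    apply PySem.Dict.items_foldl_insert_fresh
    · intro a _; rfl
    · rw [PySem.List.map_snd_enumerate]; exact hnd
  have hkeys : (pvLetterDict f letters).keys.Nodup := by
    show ((pvLetterDict f letters).items.map (·.1)).Nodup
    rw [hitems]
    simp only [List.nil_append, List.map_map]
    have : ((PySem.List.enumerate letters 0).map ((·.1) ∘ fun a => (a.2, f + a.1.toNat + 1)))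
        = letters := by
      rw [show ((·.1) ∘ fun (a : Int × Char) => (a.2, f + a.1.toNat + 1)) = (·.2) from rfl]
      exact PySem.List.map_snd_enumerate letters 0
    rw [this]; exact hnd
  refine PySem.Dict.get?_of_mem_items _ ?_ hkeys
  rw [hitems]
  simp only [List.nil_append, List.mem_map]
  refine ⟨((letters.idxOf c : Nat), c), ?_, by simp⟩
  rw [PySem.List.mem_enumerate_iff]
  have hlt : letters.idxOf c < letters.length := List.idxOf_lt_length_of_mem hc
  exact ⟨letters.idxOf c, hlt, by simp [List.getElem_idxOf hlt]⟩

theorem pvItems_eq (d : PySem.Dict Char Int) (h : d.keys.Nodup) :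
    d.items = d.keys.map (fun k => (k, d.getD k 0)) := by
  obtain ⟨l⟩ := d
  show l = _
  induction l with
  | nil => simp [PySem.Dict.keys]
  | cons kv rest ih =>
    obtain ⟨k, v⟩ := kv
    have hk : (PySem.Dict.mk ((k, v) :: rest)).keys = k :: (PySem.Dict.mk rest).keys := by
      simp [PySem.Dict.keys]
    rw [hk] at h ⊢
    have hnotin : k ∉ (PySem.Dict.mk rest).keys := (List.nodup_cons.mp h).1
    have h2 := (List.nodup_cons.mp h).2
    have hgetD : ∀ k1, k1 ≠ k →
        (PySem.Dict.mk ((k, v) :: rest)).getD k1 0 = (PySem.Dict.mk rest).getD k1 0 := by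
      intro k1 hne
      rw [PySem.Dict.getD_eq_get?_getD, PySem.Dict.getD_eq_get?_getD, PySem.Dict.get?_mk_cons]
      simp [show ¬ (k == k1) = true from by simp [Ne.symm hne]]
    have hself : (PySem.Dict.mk ((k, v) :: rest)).getD k 0 = v := by
      rw [PySem.Dict.getD_eq_get?_getD, PySem.Dict.get?_mk_cons]; simp
    simp only [List.map_cons, hself]
    congr 1
    have hmapeq : List.map (fun k1 => (k1, (PySem.Dict.mk ((k, v) :: rest)).getD k1 0))
          (PySem.Dict.mk rest).keys
        = List.map (fun k1 => (k1, (PySem.Dict.mk rest).getD k1 0)) (PySem.Dict.mk rest).keys :=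
      List.map_congr_left (fun k1 hk1 => by rw [hgetD k1 (fun he => hnotin (he ▸ hk1))])
    rw [hmapeq]
    exact ih h2

theorem pvFoldIf (c : Char) : ∀ (is : List (Char × Int)) (s : Int),
    is.foldl (fun s kv => if kv.1 < c then s + kv.2 else s) s
      = s + (is.map (fun kv => if kv.1 < c then kv.2 else 0)).sum := by
  intro is
  induction is with
  | nil => intro s; simp
  | cons kv rest ih =>
    intro s
    rw [List.foldl_cons, ih, List.map_cons, List.sum_cons]
    split_ifs <;> ring

theorem pvFoldMul (g : Int → Int) : ∀ (l : List Int) (a : Int),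
    l.foldl (fun pr v => pr * g v) a = a * (l.map g).prod := by
  intro l
  induction l with
  | nil => intro a; simp
  | cons v rest ih =>
    intro a
    rw [List.foldl_cons, ih, List.map_cons, List.prod_cons]
    ring

def pvTerm (c : Char) (t : List Char) : Int :=
  PySem.Int.floordiv (((t.countP (· < c)) : Int) * pvFactN t.length) (pvDenom (c :: t))

def pvSum : List Char → Int
  | [] => 0
  | c :: t => pvSum t + pvTerm c t

def pvBStep (n : Int) (facts : List Int) (st : PySem.Dict Char Int × Int) (p : Int × Char) :
    PySem.Dict Char Int × Int :=
  let counts := st.1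
  let rank := st.2
  let ch := p.2
  let smaller := counts.items.foldl
    (fun s kv => if kv.1 < ch then s + kv.2 else s) 0
  let rank :=
    if smaller ≠ 0 then
      let denom := counts.values.foldl
        (fun pr v => pr * PySem.List.pyGetD facts v 0) 1
      rank + PySem.Int.floordiv
        (smaller * PySem.List.pyGetD facts (n - p.1 - 1) 0) denom
    else rank
  let counts := counts.insert ch (counts.getD ch 0 - 1)
  (counts, rank)

theorem pvBFold (n : Int) (facts : List Int) :
    ∀ (t : List Char) (j : Int) (counts : PySem.Dict Char Int) (rank : Int),
    (∀ jn : Nat, jn ≤ t.length → PySem.List.pyGetD facts (jn : Int) 0 = pvFactN jn) →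
    counts.keys.Nodup → (∀ c ∈ t, c ∈ counts.keys) →
    (∀ c, counts.getD c 0 = (t.count c : Int)) → n = j + t.length →
    ((PySem.List.enumerate t j).foldl (pvBStep n facts) (counts, rank)).2
      = rank + pvSum t := by
  intro t
  induction t with
  | nil =>
    intro j counts rank _ _ _ _ _
    simp [PySem.List.enumerate_nil, pvSum]
  | cons c tt ih =>
    intro j counts rank hf hnd hcov hgetD hn
    rw [PySem.List.enumerate_cons, List.foldl_cons]
    have hsmaller : counts.items.foldl (fun s kv => if kv.1 < c then s + kv.2 else s) 0
        = ((tt.countP (· < c)) : Int) := by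
      rw [pvFoldIf, pvItems_eq counts hnd, List.map_map]
      have hmc : counts.keys.map ((fun kv : Char × Int => if kv.1 < c then kv.2 else 0)
            ∘ fun k => (k, counts.getD k 0))
          = counts.keys.map (fun k => if k < c then (((c :: tt).count k) : Int) else 0) :=
        List.map_congr_left (fun k _ => by simp only [Function.comp]; rw [hgetD k])
      rw [hmc, pvSum_count_lt c (c :: tt) counts.keys hnd hcov]
      rw [List.countP_cons]
      simp
    have hdenom : counts.values.foldl (fun pr v => pr * PySem.List.pyGetD facts v 0) 1
        = pvDenom (c :: tt) := by
      have hv : counts.values = counts.items.map (·.2) := rfl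
      rw [hv, pvItems_eq counts hnd, List.map_map, pvFoldMul, List.map_map, one_mul]
      have hmp : counts.keys.map ((fun v => PySem.List.pyGetD facts v 0)
            ∘ (fun x : Char × Int => x.2) ∘ fun k => (k, counts.getD k 0))
          = counts.keys.map (fun d => pvFactN ((c :: tt).count d)) :=
        List.map_congr_left (fun k _ => by
          simp only [Function.comp]
          rw [hgetD k, hf ((c :: tt).count k) (List.count_le_length)])
      rw [hmp, pvProd_fact (c :: tt) counts.keys hnd hcov]
    have hnj : n - j - 1 = ((tt.length : Nat) : Int) := by
      rw [hn]; push_cast [List.length_cons]; ring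
    rw [pvBStep]
    dsimp only
    rw [hsmaller, hdenom, hnj, hf tt.length (by simp)]
    rw [ih (j + 1) (counts.insert c (counts.getD c 0 - 1)) _
      (fun jn hjn => hf jn (by simp; omega))
      (by
        rw [PySem.Dict.keys_insert_of_contains counts _
          ((PySem.Dict.contains_iff_mem_keys counts c).mpr (hcov c (by simp)))]
        exact hnd)
      (by
        rw [PySem.Dict.keys_insert_of_contains counts _
          ((PySem.Dict.contains_iff_mem_keys counts c).mpr (hcov c (by simp)))]
        exact fun d hd => hcov d (by simp [hd]))
      (by
        intro d
        rw [PySem.Dict.getD_insert]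
        by_cases hd : d = c
        · subst hd
          rw [if_pos rfl, hgetD d, List.count_cons_self]
          push_cast; ring
        · rw [if_neg hd, hgetD d, List.count_cons]
          have : ¬ (c = d) := fun h => hd h.symm
          simp [this])
      (by rw [hn]; push_cast [List.length_cons]; ring)]
    by_cases hz : ((tt.countP (· < c)) : Int) ≠ 0
    · rw [if_pos hz]
      show _ = rank + (pvSum tt + pvTerm c tt)
      rw [pvTerm]
      ring
    · rw [if_neg hz]
      have hz0 : ((tt.countP (· < c)) : Int) = 0 := not_not.mp hz
      show _ = rank + (pvSum tt + pvTerm c tt)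
      have : pvTerm c tt = 0 := by
        rw [pvTerm, hz0, zero_mul, PySem.Int.floordiv_eq_ediv_of_pos (pvDenom_pos _)]
        simp
      rw [this]
      ring

theorem pvIdxOf_lt_iff (letters : List Char) (hsort : letters.Pairwise (· < ·)) (c d : Char)
    (hc : c ∈ letters) (hd : d ∈ letters) :
    (letters.idxOf d < letters.idxOf c) ↔ d < c := by
  have hmono := List.pairwise_iff_getElem.mp hsort
  have hic : letters.idxOf c < letters.length := List.idxOf_lt_length_of_mem hc
  have hid : letters.idxOf d < letters.length := List.idxOf_lt_length_of_mem hd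
  have hgc : letters[letters.idxOf c] = c := List.getElem_idxOf hic
  have hgd : letters[letters.idxOf d] = d := List.getElem_idxOf hid
  constructor
  · intro h
    have := hmono _ _ hid hic h
    rwa [hgc, hgd] at this
  · intro h
    rcases Nat.lt_trichotomy (letters.idxOf d) (letters.idxOf c) with hlt | heq | hgt
    · exact hlt
    · exfalso
      simp only [heq] at hgd
      rw [hgd.symm.trans hgc] at h
      exact lt_irrefl _ h
    · exfalso
      have := hmono _ _ hic hid hgt
      rw [hgc, hgd] at this
      exact lt_irrefl _ (this.trans h)

theorem pvIdxOf_inj (letters : List Char) (c d : Char)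
    (hc : c ∈ letters) (hd : d ∈ letters)
    (h : letters.idxOf d = letters.idxOf c) : d = c := by
  have hic : letters.idxOf c < letters.length := List.idxOf_lt_length_of_mem hc
  have hid : letters.idxOf d < letters.length := List.idxOf_lt_length_of_mem hd
  have hgc : letters[letters.idxOf c] = c := List.getElem_idxOf hic
  have hgd : letters[letters.idxOf d] = d := List.getElem_idxOf hid
  simp only [h] at hgd
  exact hgd.symm.trans hgc

def pvAStep (dict : PySem.Dict Char Nat) (st : List Int × Int × Int × Int) (p : Int × Char) :
    List Int × Int × Int × Int :=
  let arr := st.1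
  let result := st.2.1
  let dividend := st.2.2.1
  let divider := st.2.2.2
  let node := ((dict.get? p.2).getD 0 : Nat)
  let r := pvIncGet arr node
  let divider := divider * r.1
  let result := result + PySem.Int.floordiv (r.2.1 * dividend) divider
  let dividend := dividend * p.1
  (r.2.2, result, dividend, divider)

theorem pvAFold (ws letters : List Char) (K : Nat)
    (hsort : letters.Pairwise (· < ·))
    (hmem : ∀ x, x ∈ letters ↔ x ∈ ws)
    (hlen : letters.length < 2 ^ K) :
    ∀ (rest s : List Char), (∀ x ∈ rest, x ∈ ws) → (∀ x ∈ s, x ∈ ws) →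
    ((PySem.List.enumerate rest ((s.length : Int) + 1)).foldl
      (pvAStep (pvLetterDict (2 ^ K) letters))
      (pvInsL (2 ^ (K + 1)) (s.map (fun x => 2 ^ K + letters.idxOf x + 1)), pvSum s,
        pvFactN s.length, pvDenom s))
    = (pvInsL (2 ^ (K + 1)) ((rest.reverse ++ s).map (fun x => 2 ^ K + letters.idxOf x + 1)),
        pvSum (rest.reverse ++ s), pvFactN (rest.reverse ++ s).length,
        pvDenom (rest.reverse ++ s)) := by
  intro rest
  induction rest with
  | nil =>
    intro s _ _
    simp [PySem.List.enumerate_nil]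
  | cons c rest' ih =>
    intro s hrest hs
    have hnodup : letters.Nodup := hsort.imp (fun h => ne_of_lt h)
    have hcw : c ∈ ws := hrest c (by simp)
    have hcl : c ∈ letters := (hmem c).mpr hcw
    have hpow : 2 ^ (K + 1) = 2 * 2 ^ K := by ring
    have hbounds : ∀ x ∈ ws, 2 ^ K ≤ 2 ^ K + letters.idxOf x + 1
        ∧ 2 ^ K + letters.idxOf x + 1 < 2 ^ (K + 1) := by
      intro x hx
      have := List.idxOf_lt_length_of_mem ((hmem x).mpr hx)
      omega
    rw [PySem.List.enumerate_cons, List.foldl_cons, pvAStep]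
    dsimp only
    -- the dict lookup
    rw [pvLetterDict_get (2 ^ K) letters hnodup c hcl]
    -- the tree update
    have hls : ∀ w ∈ s.map (fun x => 2 ^ K + letters.idxOf x + 1),
        2 ^ K ≤ w ∧ w < 2 ^ (K + 1) := by
      intro w hw
      simp only [List.mem_map] at hw
      obtain ⟨x, hx, rfl⟩ := hw
      exact hbounds x (hs x hx)
    have hcount : (s.map (fun x => 2 ^ K + letters.idxOf x + 1)).count
        (2 ^ K + letters.idxOf c + 1) = s.count c := by
      rw [List.count_eq_countP, List.countP_map, List.count_eq_countP]
      apply List.countP_congr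
      intro x hx
      simp only [Function.comp, beq_iff_eq]
      constructor
      · intro h
        have := pvIdxOf_inj letters c x hcl ((hmem x).mpr (hs x hx)) (by omega)
        simp [this]
      · intro h
        have : x = c := by simpa using h
        subst this; simp
    have hcountP : (s.map (fun x => 2 ^ K + letters.idxOf x + 1)).countP
        (· < 2 ^ K + letters.idxOf c + 1) = s.countP (· < c) := by
      rw [List.countP_map]
      apply List.countP_congr
      intro x hx
      simp only [Function.comp, decide_eq_true_eq]
      have hxl : x ∈ letters := (hmem x).mpr (hs x hx)
      constructor
      · intro h
        exact (pvIdxOf_lt_iff letters hsort c x hcl hxl).mp (by omega)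
      · intro h
        have := (pvIdxOf_lt_iff letters hsort c x hcl hxl).mpr h
        omega
    have hr : pvIncGet (pvInsL (2 ^ (K + 1)) (s.map (fun x => 2 ^ K + letters.idxOf x + 1)))
        (2 ^ K + letters.idxOf c + 1)
        = (((s.count c : Nat) : Int) + 1, ((s.countP (· < c) : Nat) : Int),
          pvInsL (2 ^ (K + 1)) ((c :: s).map (fun x => 2 ^ K + letters.idxOf x + 1))) := by
      rw [pvIncGet_spec K _ _ hls (hbounds c hcw).1 (hbounds c hcw).2, hcount, hcountP]
      rfl
    rw [Option.getD_some, hr]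
    dsimp only
    -- fold the four state components into their (c :: s) forms
    have harr : pvDenom s * (((s.count c : Nat) : Int) + 1) = pvDenom (c :: s) := rfl
    have hres : pvSum s + PySem.Int.floordiv (((s.countP (· < c) : Nat) : Int) * pvFactN s.length)
        (pvDenom (c :: s)) = pvSum (c :: s) := by
      rw [pvSum, pvTerm]
    have hdiv : pvFactN s.length * ((s.length : Int) + 1) = pvFactN (c :: s).length := by
      rw [pvFactN, pvFactN, List.length_cons, Nat.factorial_succ]
      push_cast; ring
    rw [harr, hres, hdiv]
    have hstart : (s.length : Int) + 1 + 1 = (((c :: s).length : Nat) : Int) + 1 := by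
      push_cast [List.length_cons]; ring
    rw [hstart]
    rw [ih (c :: s) (fun x hx => hrest x (by simp [hx]))
      (fun x hx => by
        rcases List.mem_cons.mp hx with h | h
        · exact h ▸ hcw
        · exact hs x h)]
    have : rest'.reverse ++ (c :: s) = (c :: rest').reverse ++ s := by
      simp [List.reverse_cons, List.append_assoc]
    rw [this]

-- ===== ASSEMBLY: both ports compute 1 + the sum of the per-position terms =====

theorem pvB_eq (word : String) : listPosition_alt word = 1 + pvSum word.toList := by
  have h0 : listPosition_alt word
      = ((PySem.List.enumerate word.toList 0).foldl
          (pvBStep (PySem.Str.len word)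
            (((PySem.List.pyRange 1 (PySem.Str.len word + 1) 1).foldl
              (fun (st : List Int × Int) i => (st.1 ++ [st.2 * i], st.2 * i)) ([1], 1)).1))
          (word.toList.foldl (fun d ch => d.insert ch (d.getD ch 0 + 1)) PySem.Dict.empty,
            1)).2 := rfl
  rw [h0, PySem.Dict.foldl_insert_getD_add_one_eq_counter, PySem.Str.len_eq,
    pvFactsTable word.toList.length]
  exact pvBFold _ _ word.toList 0 (PySem.Dict.counter word.toList) 1
    (fun jn hjn => by
      rw [PySem.List.pyGetD_natCast, PySem.List.getD_map_range _ _ _ _ (by omega)])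
    (PySem.Dict.nodup_keys_counter _)
    (fun c hc => by rw [PySem.Dict.keys_counter]; exact (PySem.Set.mem_ofList _ c).mpr hc)
    (fun c => PySem.Dict.getD_counter _ c)
    (by ring)

theorem pvA_eq (word : String) : listPosition word = pvSum word.toList + 1 := by
  obtain ⟨K, hK, hlen⟩ := pvFirstLeaf_pow (pvLetters word).length
    ((pvLetters word).length + 1 - 1) 1 0 (by omega) (by norm_num)
  have hsort : (pvLetters word).Pairwise (· < ·) :=
    PySem.List.sorted_ofList_pairwise_lt word.toList
  have hmem : ∀ x, x ∈ pvLetters word ↔ x ∈ word.toList := fun x => by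
    rw [pvLetters, PySem.List.mem_sorted]
    exact PySem.Set.mem_ofList _ x
  have h0 : listPosition word
      = ((PySem.List.enumerate ((PySem.List.slice? word.toList none none (-1)).getD []) 1).foldl
          (pvAStep (pvLetterDict (pvFirstLeaf (pvLetters word).length 1) (pvLetters word)))
          (List.replicate (2 * pvFirstLeaf (pvLetters word).length 1) 0, 0, 1, 1)).2.1 + 1 := rfl
  rw [h0, hK, PySem.List.slice?_none_none_neg_one, Option.getD_some]
  have h2 : 2 * 2 ^ K = 2 ^ (K + 1) := by ring
  have hrepl : ((List.replicate (2 * 2 ^ K) (0:Int)), (0:Int), (1:Int), (1:Int))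
      = (pvInsL (2 ^ (K + 1))
          ((([]:List Char)).map (fun x => 2 ^ K + (pvLetters word).idxOf x + 1)),
         pvSum [], pvFactN ([]:List Char).length, pvDenom []) := by
    rw [← h2]
    simp [pvInsL, pvSum, pvFactN, pvDenom, Nat.factorial]
  rw [hrepl,
    show PySem.List.enumerate word.toList.reverse 1
        = PySem.List.enumerate word.toList.reverse (((([]:List Char).length : Nat) : Int) + 1)
      from by norm_num]
  rw [pvAFold word.toList (pvLetters word) K hsort hmem hlen word.toList.reverse []
    (fun x hx => List.mem_reverse.mp hx) (by simp)]
  simp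

-- ===== VERDICT (by name: the statement is the Claim_ definition above) =====
theorem listPosition_spec : Claim_equal_listPosition := by
  intro word _
  show listPosition word = listPosition_alt word
  rw [pvA_eq, pvB_eq]
  ring
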